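-- pv_equiv track=rewrite | github.com/Senzo13/JoyBoy | core/perfatlas/providers.py | _candidate_zone_names
-- ===== SOURCE A (Python) =====
-- from typing import Any, Dict, List
--
-- def _candidate_zone_names(host: str) -> List[str]:
--     parts = [part for part in str(host or "").split(".") if part]
--     candidates: List[str] = []
--     for index in range(len(parts) - 1):
--         suffix = ".".join(parts[index:])
--         if suffix.count(".") >= 1 and suffix not in candidates:
--             candidates.append(suffix)
--     return candidates
-- ===== SOURCE B (Python) =====
-- from typing import Any, Dict, List
--
-- def _candidate_zone_names(host: str) -> List[str]:
--     # Single reverse pass with a running accumulator instead of re-joining a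
--     # slice for every index; suffixes are collected shortest-first and the
--     # result is reversed once at the end to restore longest-first order.
--     parts = [part for part in str(host or "").split(".") if part]
--     out: List[str] = []
--     acc = ""
--     for label in reversed(parts):
--         if acc:
--             acc = label + "." + acc
--             out.append(acc)
--         else:
--             acc = label
--     out.reverse()
--     return out
-- ===== Notes on version B (the rewrite author's own statement) =====
-- stated objective: alternative
-- what changed: Replaces the per-index slice-and-join loop (which also re-scans the result list for duplicates and counts dots in every suffix) by a single right-to-left pass that extends one running accumulator string and collects each suffix as it grows, reversing the collected list once at the end.
import Mathlib
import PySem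

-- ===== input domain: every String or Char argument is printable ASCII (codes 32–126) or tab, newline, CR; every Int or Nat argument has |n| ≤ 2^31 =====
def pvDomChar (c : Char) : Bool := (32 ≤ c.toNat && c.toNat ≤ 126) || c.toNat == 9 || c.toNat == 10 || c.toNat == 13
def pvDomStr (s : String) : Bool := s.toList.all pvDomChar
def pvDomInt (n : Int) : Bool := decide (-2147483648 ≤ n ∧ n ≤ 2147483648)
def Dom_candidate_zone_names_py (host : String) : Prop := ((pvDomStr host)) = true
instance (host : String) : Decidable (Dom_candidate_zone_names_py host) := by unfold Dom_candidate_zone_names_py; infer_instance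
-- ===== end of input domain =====

-- B replaces A's per-index slice-and-join loop (with its duplicate membership scan and dot count)
-- by one right-to-left pass growing a single accumulator string; objective: alternative.

-- ===== PORT A =====
def candidate_zone_names_py (host : String) : List String :=
  let s := if host = "" then "" else host                                   -- str(host or "")
  let parts := ((PySem.Str.split? s ".").getD []).filter (fun part => decide (part ≠ ""))  -- sep "." ≠ "", split? never none
  (PySem.List.pyRange 0 ((parts.length : Int) - 1) 1).foldl
    (fun candidates index =>
      let suffix := PySem.Str.join "." (PySem.List.slice parts (some index) none)   -- ".".join(parts[index:])
      if 1 ≤ PySem.Str.count suffix "." ∧ suffix ∉ candidates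
      then candidates ++ [suffix] else candidates) []

-- ===== PORT B =====
def candidate_zone_names_py_alt (host : String) : List String :=
  let s := if host = "" then "" else host                                   -- str(host or "")
  let parts := ((PySem.Str.split? s ".").getD []).filter (fun part => decide (part ≠ ""))  -- sep "." ≠ "", split? never none
  let r := parts.reverse.foldl
    (fun (st : String × List String) label =>
      if st.1 ≠ "" then
        let acc := String.ofList (label.toList ++ '.' :: st.1.toList)       -- label + "." + acc, exact concatenation
        (acc, st.2 ++ [acc])
      else (label, st.2)) ("", [])
  r.2.reverse

-- ===== PRECONDITION & SPEC =====
def Spec_candidate_zone_names_py (host : String) (out : List String) : Prop := out = candidate_zone_names_py_alt host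
instance (host : String) (out : List String) : Decidable (Spec_candidate_zone_names_py host out) := by unfold Spec_candidate_zone_names_py; infer_instance

-- ===== CLAIM (what is proved, stated in full; the proofs are below) =====
def Claim_equal_candidate_zone_names_py : Prop := ∀ (host : String), Dom_candidate_zone_names_py host → Spec_candidate_zone_names_py host (candidate_zone_names_py host)

-- ===== LEMMAS AND PROOFS =====

def pvJoin (l : List String) : String := PySem.Str.join "." l

def pvSuf (ps : List String) : List String :=
  (List.range (ps.length - 1)).map (fun i => pvJoin (ps.drop i))

theorem pv_go_le (sub : List Char) : ∀ (fuel : ℕ) (l : List Char) (acc : ℕ),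
    acc ≤ PySem.Chars.count.go sub fuel l acc := by
  intro fuel
  induction fuel with
  | zero => intro l acc; exact le_refl _
  | succ f ih =>
    intro l acc
    cases l with
    | nil => exact le_refl _
    | cons hd t =>
      show acc ≤ if sub.isPrefixOf (hd :: t) = true
        then PySem.Chars.count.go sub f (List.drop sub.length (hd :: t)) (acc + 1)
        else PySem.Chars.count.go sub f t acc
      split_ifs with hp
      · exact le_trans (Nat.le_succ acc) (ih _ _)
      · exact ih _ _

theorem pv_go_pos : ∀ (fuel : ℕ) (l : List Char), '.' ∈ l → l.length ≤ fuel →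
    1 ≤ PySem.Chars.count.go ['.'] fuel l 0 := by
  intro fuel
  induction fuel with
  | zero =>
    intro l hm hl
    cases l with
    | nil => simp at hm
    | cons hd t => simp at hl
  | succ f ih =>
    intro l hm hl
    cases l with
    | nil => simp at hm
    | cons hd t =>
      show 1 ≤ if ['.'].isPrefixOf (hd :: t) = true
        then PySem.Chars.count.go ['.'] f (List.drop ['.'].length (hd :: t)) (0 + 1)
        else PySem.Chars.count.go ['.'] f t 0
      split_ifs with hp
      · exact pv_go_le _ _ _ _
      · rcases List.mem_cons.mp hm with h1 | h2
        · exfalso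
          apply hp
          simp [List.isPrefixOf, ← h1]
        · apply ih t h2
          simp at hl
          omega

theorem pv_count_pos (p q : List Char) : 1 ≤ PySem.Chars.count (p ++ '.' :: q) ['.'] := by
  have : PySem.Chars.count (p ++ '.' :: q) ['.']
      = PySem.Chars.count.go ['.'] (p ++ '.' :: q).length (p ++ '.' :: q) 0 := by
    simp [PySem.Chars.count]
  rw [this]
  exact pv_go_pos _ _ (by simp) (le_refl _)

theorem pv_str_len_pos (x : String) (hx : x ≠ "") : 0 < x.toList.length := by
  rcases hn : x.toList with _ | ⟨c, cs⟩
  · exfalso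
    apply hx
    have := congrArg String.ofList hn
    simpa using this
  · simp

theorem pv_join_cons (a : String) (l : List String) (hl : l ≠ []) :
    (pvJoin (a :: l)).toList = a.toList ++ '.' :: (pvJoin l).toList := by
  cases l with
  | nil => exact absurd rfl hl
  | cons y r =>
    simp [pvJoin, PySem.Str.toList_join, PySem.Chars.join_cons_cons]

theorem pv_join_ne (l : List String) (h : ∀ p ∈ l, p ≠ "") (hl : l ≠ []) : pvJoin l ≠ "" := by
  cases l with
  | nil => exact absurd rfl hl
  | cons a t =>
    intro hcon
    have htl := congrArg String.toList hcon
    cases t with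
    | nil =>
      have : (pvJoin [a]).toList = a.toList := by
        simp [pvJoin, PySem.Str.toList_join, PySem.Chars.join_singleton]
      rw [this] at htl
      have := pv_str_len_pos a (h a (by simp))
      simp at htl
      rw [htl] at this
      simp at this
    | cons y r =>
      rw [pv_join_cons a (y :: r) (by simp)] at htl
      simp at htl

theorem pv_len_step (ps : List String) (h : ∀ p ∈ ps, p ≠ "") (j : ℕ) (hj : j < ps.length) :
    (pvJoin (ps.drop (j + 1))).toList.length < (pvJoin (ps.drop j)).toList.length := by
  have hd : ps.drop j = ps[j] :: ps.drop (j + 1) := List.drop_eq_getElem_cons hj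
  have hx : 0 < ps[j].toList.length := pv_str_len_pos _ (h _ (List.getElem_mem hj))
  rcases hr : ps.drop (j + 1) with _ | ⟨y, r⟩
  · rw [hd, hr]
    have hL : (pvJoin ([] : List String)).toList = [] := by
      simp [pvJoin, PySem.Str.toList_join, PySem.Chars.join_nil]
    have hR : (pvJoin [ps[j]]).toList = ps[j].toList := by
      simp [pvJoin, PySem.Str.toList_join, PySem.Chars.join_singleton]
    rw [hL, hR]
    simpa using hx
  · rw [hd, hr]
    rw [pv_join_cons ps[j] (y :: r) (by simp)]
    rw [List.length_append]
    simp only [List.length_cons]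
    omega

theorem pv_len_lt (ps : List String) (h : ∀ p ∈ ps, p ≠ "") :
    ∀ (i j : ℕ), j < i → i < ps.length →
      (pvJoin (ps.drop i)).toList.length < (pvJoin (ps.drop j)).toList.length := by
  intro i
  induction i with
  | zero => intro j hj _; omega
  | succ n ih =>
    intro j hj hi
    rcases Nat.lt_succ_iff_lt_or_eq.mp hj with hlt | heq
    · exact lt_trans (pv_len_step ps h n (by omega)) (ih j hlt (by omega))
    · rw [heq]
      exact pv_len_step ps h n (by omega)

theorem pv_not_mem (ps : List String) (h : ∀ p ∈ ps, p ≠ "") (m : ℕ) (hm : m < ps.length) :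
    pvJoin (ps.drop m) ∉ (List.range m).map (fun i => pvJoin (ps.drop i)) := by
  intro hmem
  rcases List.mem_map.mp hmem with ⟨i, hi, he⟩
  have hlen := pv_len_lt ps h m i (List.mem_range.mp hi) hm
  rw [he] at hlen
  omega

theorem pv_suf_cons (a : String) (l : List String) (hl : l ≠ []) :
    pvSuf (a :: l) = pvJoin (a :: l) :: pvSuf l := by
  cases l with
  | nil => exact absurd rfl hl
  | cons y r =>
    simp only [pvSuf, List.length_cons, Nat.add_sub_cancel]
    rw [List.range_succ_eq_map]
    simp [List.map_map, Function.comp]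

theorem pv_Aloop (ps : List String) (h : ∀ p ∈ ps, p ≠ "") : ∀ (m : ℕ), m + 1 ≤ ps.length →
    (List.range m).foldl (fun c k =>
      if 1 ≤ PySem.Str.count (pvJoin (ps.drop k)) "." ∧ pvJoin (ps.drop k) ∉ c
      then c ++ [pvJoin (ps.drop k)] else c) []
    = (List.range m).map (fun i => pvJoin (ps.drop i)) := by
  intro m
  induction m with
  | zero => intro _; simp
  | succ n ih =>
    intro hm
    rw [List.range_succ, List.foldl_append, ih (by omega), List.map_append]
    simp only [List.foldl_cons, List.foldl_nil, List.map_cons, List.map_nil]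
    have h2 : 2 ≤ (ps.drop n).length := by
      simp
      omega
    have hcount : 1 ≤ PySem.Str.count (pvJoin (ps.drop n)) "." := by
      rcases hdn : ps.drop n with _ | ⟨x, t⟩
      · rw [hdn] at h2; simp at h2
      · rcases t with _ | ⟨y, r⟩
        · rw [hdn] at h2; simp at h2
        · have hjoin : (pvJoin (x :: y :: r)).toList
              = x.toList ++ '.' :: PySem.Chars.join ['.'] (List.map String.toList (y :: r)) := by
            simp [pvJoin, PySem.Str.toList_join, PySem.Chars.join_cons_cons]
          rw [PySem.Str.count_eq, hjoin]
          exact pv_count_pos _ _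
    have hmem := pv_not_mem ps h n (by omega)
    rw [if_pos ⟨hcount, hmem⟩]

theorem pv_Bloop (ps : List String) : ps ≠ [] → (∀ p ∈ ps, p ≠ "") →
    ps.reverse.foldl (fun (st : String × List String) label =>
      if st.1 ≠ "" then
        let acc := String.ofList (label.toList ++ '.' :: st.1.toList)
        (acc, st.2 ++ [acc])
      else (label, st.2)) ("", [])
    = (pvJoin ps, (pvSuf ps).reverse) := by
  induction ps with
  | nil => intro h _; exact absurd rfl h
  | cons a l ih =>
    intro _ h
    rw [List.reverse_cons, List.foldl_append]
    cases l with
    | nil =>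
      simp only [List.reverse_nil, List.foldl_nil, List.foldl_cons]
      rw [if_neg (by simp)]
      have h1 : pvJoin [a] = a := by
        have : (pvJoin [a]).toList = a.toList := by
          simp [pvJoin, PySem.Str.toList_join, PySem.Chars.join_singleton]
        have h2 := congrArg String.ofList this
        simpa using h2
      simp [pvSuf, h1]
    | cons y r =>
      have hl : (y :: r) ≠ [] := by simp
      rw [ih hl (fun p hp => h p (List.mem_cons_of_mem _ hp))]
      simp only [List.foldl_cons, List.foldl_nil]
      have hne : pvJoin (y :: r) ≠ "" := pv_join_ne _ (fun p hp => h p (List.mem_cons_of_mem _ hp)) hl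
      rw [if_pos hne]
      have hacc : String.ofList (a.toList ++ '.' :: (pvJoin (y :: r)).toList) = pvJoin (a :: y :: r) := by
        rw [← pv_join_cons a (y :: r) hl]
        simp
      simp only [hacc]
      rw [pv_suf_cons a (y :: r) hl]
      simp

theorem pv_main (ps : List String) (h : ∀ p ∈ ps, p ≠ "") :
    (PySem.List.pyRange 0 ((ps.length : Int) - 1) 1).foldl
      (fun candidates index =>
        let suffix := PySem.Str.join "." (PySem.List.slice ps (some index) none)
        if 1 ≤ PySem.Str.count suffix "." ∧ suffix ∉ candidates
        then candidates ++ [suffix] else candidates) []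
    = (ps.reverse.foldl (fun (st : String × List String) label =>
        if st.1 ≠ "" then
          let acc := String.ofList (label.toList ++ '.' :: st.1.toList)
          (acc, st.2 ++ [acc])
        else (label, st.2)) ("", [])).2.reverse := by
  cases ps with
  | nil => rfl
  | cons a l =>
    rw [pv_Bloop (a :: l) (by simp) h]
    have hrange : PySem.List.pyRange 0 (((a :: l).length : Int) - 1) 1
        = (List.range l.length).map (Nat.cast : ℕ → Int) := by
      have h1 : (((a :: l).length : ℕ) : Int) - 1 = (l.length : Int) := by
        simp
      rw [h1]
      rw [PySem.List.pyRange_of_pos 0 (l.length : Int) (by norm_num : (0:Int) < 1)]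
      have h2 : (if (0:Int) < (l.length : Int) then (((l.length : Int) - 0 + 1 - 1) / 1).toNat else 0) = l.length := by
        split_ifs with hpos <;> omega
      rw [h2]
      simp only [zero_add, one_mul]
    rw [hrange, List.foldl_map]
    simp only [PySem.List.slice_from_natCast]
    have hA := pv_Aloop (a :: l) h l.length (by simp)
    simp only [pvJoin] at hA
    rw [hA]
    simp [pvSuf, pvJoin]

-- ===== VERDICT (by name: the statement is the Claim_ definition above) =====
theorem candidate_zone_names_py_spec : Claim_equal_candidate_zone_names_py := by
  intro host _
  show candidate_zone_names_py host = candidate_zone_names_py_alt host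
  simp only [candidate_zone_names_py, candidate_zone_names_py_alt]
  apply pv_main
  intro p hp
  have := (List.mem_filter.mp hp).2
  simpa using this
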